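-- pv_equiv track=rewrite | github.com/kikossik/cs2-shadowpro | backend/round_mapper.py | _infer_site_from_places
-- ===== SOURCE A (Python) =====
-- from typing import Any, Sequence
--
-- _SITE_A_PLACES = {"abombsite", "bombsitea", "aramp", "palace", "heaven", "ticketbooth"}
--
-- _SITE_B_PLACES = {"bbombsite", "bombsiteb", "apartments", "truck", "shop", "marketplace"}
--
-- def _normalize_place(name: str | None) -> str | None:
--     """Strip punctuation and lowercase a place name."""
--     if not name:
--         return None
--     normalized = "".join(ch for ch in str(name).lower() if ch.isalnum())
--     return normalized or None
--
-- def _infer_site_from_places(places: Sequence[str | None]) -> str | None: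
--     """Guess A vs B from alive-player place names during the window."""
--     a_votes = b_votes = 0
--     for p in places:
--         n = _normalize_place(p)
--         if not n:
--             continue
--         if n in _SITE_A_PLACES:
--             a_votes += 1
--         elif n in _SITE_B_PLACES:
--             b_votes += 1
--     if not (a_votes or b_votes):
--         return None
--     return "a" if a_votes > b_votes else "b"
-- ===== SOURCE B (Python) =====
-- # B: frequency-table decomposition — count normalized names once, then sum votes
-- # over the fixed site-name sets (alternative structure, same results as A).
-- _SITE_A_PLACES = {"abombsite", "bombsitea", "aramp", "palace", "heaven", "ticketbooth"}
--
-- _SITE_B_PLACES = {"bbombsite", "bombsiteb", "apartments", "truck", "shop", "marketplace"}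
--
--
-- def _normalize_place(name):
--     if not name:
--         return None
--     normalized = "".join(ch for ch in str(name).lower() if ch.isalnum())
--     return normalized or None
--
--
-- def _infer_site_from_places(places):
--     counts = {}
--     for n in map(_normalize_place, places):
--         if n is not None:
--             counts[n] = counts.get(n, 0) + 1
--     a_votes = sum(counts.get(name, 0) for name in _SITE_A_PLACES)
--     b_votes = sum(counts.get(name, 0) for name in _SITE_B_PLACES)
--     if a_votes == 0 and b_votes == 0:
--         return None
--     return "a" if a_votes > b_votes else "b"
-- ===== Notes on version B (the rewrite author's own statement) =====
-- stated objective: alternative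
-- what changed: B builds a frequency table of normalized place names in one pass and then sums votes by iterating over the fixed site-name sets, instead of A's branching if/elif vote counters inside the scan.
import Mathlib
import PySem

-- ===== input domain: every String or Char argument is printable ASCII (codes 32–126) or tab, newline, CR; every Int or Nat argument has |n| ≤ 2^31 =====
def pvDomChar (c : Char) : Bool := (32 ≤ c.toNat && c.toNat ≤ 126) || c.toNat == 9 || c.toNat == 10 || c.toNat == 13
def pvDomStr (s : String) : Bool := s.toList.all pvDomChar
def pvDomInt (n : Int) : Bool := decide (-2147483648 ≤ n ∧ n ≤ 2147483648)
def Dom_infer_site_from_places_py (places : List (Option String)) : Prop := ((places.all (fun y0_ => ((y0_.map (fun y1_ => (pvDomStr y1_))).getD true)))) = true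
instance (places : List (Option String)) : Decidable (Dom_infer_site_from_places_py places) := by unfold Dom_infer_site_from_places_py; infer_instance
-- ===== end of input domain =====

-- B replaces A's in-scan if/elif vote counters by a frequency table of normalized
-- names summed over the fixed site-name sets (alternative decomposition, same values).

-- ===== PORT A =====
-- _SITE_A_PLACES / _SITE_B_PLACES (Python sets of distinct string literals)
def pvSiteA : List String := ["abombsite", "bombsitea", "aramp", "palace", "heaven", "ticketbooth"]
def pvSiteB : List String := ["bbombsite", "bombsiteb", "apartments", "truck", "shop", "marketplace"]

-- _normalize_place: '' and None are falsy; join of lowered alnum chars, 'or None'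
def pvNormalizePlace (name : Option String) : Option String :=
  match name with
  | none => none
  | some s =>
    if s.toList.isEmpty then none
    else
      let normalized := (PySem.Chars.lower s.toList).filter (fun ch => PySem.Chars.isalnum ch)
      if normalized.isEmpty then none else some (String.ofList normalized)

-- the loop body of A: n = _normalize_place(p); if not n: continue; if/elif vote
def pvStepA (ab : Int × Int) (p : Option String) : Int × Int :=
  match pvNormalizePlace p with
  | none => ab
  | some n =>
    if n.toList.isEmpty then ab
    else if pvSiteA.contains n then (ab.1 + 1, ab.2)
    else if pvSiteB.contains n then (ab.1, ab.2 + 1)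
    else ab

def infer_site_from_places_py (places : List (Option String)) : Option String :=
  let st := places.foldl pvStepA (0, 0)
  if st.1 = 0 ∧ st.2 = 0 then none
  else if st.1 > st.2 then some "a" else some "b"

-- ===== PORT B =====
def infer_site_from_places_py_alt (places : List (Option String)) : Option String :=
  let counts := PySem.Dict.counter (places.filterMap pvNormalizePlace)
  let a_votes := (pvSiteA.map (fun name => counts.getD name 0)).sum
  let b_votes := (pvSiteB.map (fun name => counts.getD name 0)).sum
  if a_votes = 0 ∧ b_votes = 0 then none
  else if a_votes > b_votes then some "a" else some "b"

-- ===== PRECONDITION & SPEC =====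
def Spec_infer_site_from_places_py (places : List (Option String)) (out : Option String) : Prop := out = infer_site_from_places_py_alt places
instance (places : List (Option String)) (out : Option String) : Decidable (Spec_infer_site_from_places_py places out) := by unfold Spec_infer_site_from_places_py; infer_instance

-- ===== CLAIM (what is proved, stated in full; the proofs are below) =====
def Claim_equal_infer_site_from_places_py : Prop := ∀ (places : List (Option String)), Dom_infer_site_from_places_py places → Spec_infer_site_from_places_py places (infer_site_from_places_py places)

-- ===== LEMMAS AND PROOFS =====

-- _normalize_place never returns the empty string (Python's 'normalized or None')
lemma pvNormalizePlace_ne_empty (p : Option String) (n : String)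
    (h : pvNormalizePlace p = some n) : n.toList.isEmpty = false := by
  unfold pvNormalizePlace at h
  cases p with
  | none => simp at h
  | some s =>
    simp only [] at h
    split at h
    · simp at h
    · split at h
      · simp at h
      · rename_i hne
        cases h
        simp only [Bool.not_eq_true] at hne
        simpa using hne

-- A's loop adds, to each counter, the number of normalized names in (elif-order) its set
lemma pvLoopA (places : List (Option String)) (a b : Int) :
    places.foldl pvStepA (a, b) =
      (a + ((places.filterMap pvNormalizePlace).countP (fun n => pvSiteA.contains n) : Int),
       b + ((places.filterMap pvNormalizePlace).countP (fun n => !pvSiteA.contains n && pvSiteB.contains n) : Int)) := by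
  induction places generalizing a b with
  | nil => simp
  | cons p ps ih =>
    simp only [List.foldl_cons, List.filterMap_cons]
    cases hn : pvNormalizePlace p with
    | none =>
      simp only [pvStepA, hn]
      simpa using ih a b
    | some n =>
      have hne := pvNormalizePlace_ne_empty p n hn
      simp only [pvStepA, hn, hne, List.countP_cons]
      by_cases hA : pvSiteA.contains n = true
      · simp only [hA, if_true, Bool.not_true, Bool.false_and, ih]
        simp only [Prod.mk.injEq]
        push_cast
        constructor <;> ring
      · simp only [Bool.not_eq_true] at hA
        simp only [hA, Bool.false_eq_true, if_false, Bool.not_false, Bool.true_and]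
        by_cases hB : pvSiteB.contains n = true
        · simp only [hB, if_true, ih, Prod.mk.injEq]
          push_cast
          constructor <;> ring
        · simp only [Bool.not_eq_true] at hB
          simp only [hB, Bool.false_eq_true, if_false, ih]
          simp

-- summing a nodup name-list's counts in L counts L's members of the list
lemma pvSumCounts (names : List String) (L : List String) (hnd : names.Nodup) :
    (names.map (fun nm => ((L.count nm : Nat) : Int))).sum =
      ((L.countP (fun n => names.contains n) : Nat) : Int) := by
  induction L with
  | nil => simp
  | cons x L ih =>
    have hx : (names.map (fun nm => (if (x == nm) = true then (1 : Int) else 0))).sum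
        = ((names.count x : Nat) : Int) := by
      rw [PySem.List.sum_map_ite_one_zero (fun nm => x == nm) names]
      norm_cast
      unfold List.count
      apply List.countP_congr
      intro a _
      simp only [beq_iff_eq]
      exact eq_comm
    simp only [List.count_cons, List.countP_cons]
    push_cast
    rw [PySem.List.sum_map_add_int names (fun nm => ((L.count nm : Nat) : Int))
        (fun nm => if (x == nm) = true then (1 : Int) else 0)]
    rw [ih, hx]
    by_cases hm : x ∈ names
    · rw [List.count_eq_one_of_mem hnd hm]
      simp [hm]
    · rw [List.count_eq_zero.mpr hm]
      simp [hm]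

-- the two site-name sets are disjoint
lemma pvDisjoint (n : String) (h : n ∈ pvSiteB) : n ∉ pvSiteA := by
  fin_cases h <;> decide

theorem pv_main (places : List (Option String)) :
    infer_site_from_places_py places = infer_site_from_places_py_alt places := by
  unfold infer_site_from_places_py infer_site_from_places_py_alt
  rw [pvLoopA]
  have hgd : ∀ name, (PySem.Dict.counter (places.filterMap pvNormalizePlace)).getD name 0
      = (((places.filterMap pvNormalizePlace).count name : Nat) : Int) := fun name =>
    PySem.Dict.getD_counter _ name
  have hA : ((pvSiteA.map (fun name => (PySem.Dict.counter (places.filterMap pvNormalizePlace)).getD name 0)).sum)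
      = (((places.filterMap pvNormalizePlace).countP (fun n => pvSiteA.contains n) : Nat) : Int) := by
    simp only [hgd]
    exact pvSumCounts pvSiteA _ (by decide)
  have hB : ((pvSiteB.map (fun name => (PySem.Dict.counter (places.filterMap pvNormalizePlace)).getD name 0)).sum)
      = (((places.filterMap pvNormalizePlace).countP (fun n => !pvSiteA.contains n && pvSiteB.contains n) : Nat) : Int) := by
    simp only [hgd]
    rw [pvSumCounts pvSiteB _ (by decide)]
    congr 1
    apply List.countP_congr
    intro n _
    by_cases h : n ∈ pvSiteB
    · simp [h, pvDisjoint n h]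
    · simp [h]
  simp only [hA, hB, zero_add]

-- ===== VERDICT (by name: the statement is the Claim_ definition above) =====
theorem infer_site_from_places_py_spec : Claim_equal_infer_site_from_places_py := by
  intro places _
  unfold Spec_infer_site_from_places_py
  exact pv_main places
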